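-- pv_equiv track=rewrite | github.com/YewLabs/2021-hunt | hunt/special_puzzles/make_your_own_wordsearch/check.py | check
-- ===== SOURCE A (Python) =====
-- def check(grid, words):
--     n, m = len(grid), len(grid[0])
--     rlines = [[grid[y][x] for x in range(m)] for y in range(n)]
--     clines = [[grid[y][x] for y in range(n)] for x in range(m)]
--     lines = rlines + clines
--     if any(len(set(line)) != len(line) for line in lines):
--         return False, "All letters in each row and column must be distinct."
--     return True, None
-- ===== SOURCE B (Python) =====
-- def check(grid, words):
--     n, m = len(grid), len(grid[0])
--     for y in range(n):
--         for x in range(m):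
--             c = grid[y][x]
--             if any(grid[y][i] == c for i in range(x)) or any(grid[j][x] == c for j in range(y)):
--                 return False, "All letters in each row and column must be distinct."
--     return True, None
-- ===== Notes on version B (the rewrite author's own statement) =====
-- stated objective: alternative
-- what changed: Instead of materialising all row and column line lists and comparing set sizes, B scans the cells once in reading order and at each cell checks the prefix of its row and column for an equal letter, returning early at the first duplicate; no line lists or sets are built.
import Mathlib
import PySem

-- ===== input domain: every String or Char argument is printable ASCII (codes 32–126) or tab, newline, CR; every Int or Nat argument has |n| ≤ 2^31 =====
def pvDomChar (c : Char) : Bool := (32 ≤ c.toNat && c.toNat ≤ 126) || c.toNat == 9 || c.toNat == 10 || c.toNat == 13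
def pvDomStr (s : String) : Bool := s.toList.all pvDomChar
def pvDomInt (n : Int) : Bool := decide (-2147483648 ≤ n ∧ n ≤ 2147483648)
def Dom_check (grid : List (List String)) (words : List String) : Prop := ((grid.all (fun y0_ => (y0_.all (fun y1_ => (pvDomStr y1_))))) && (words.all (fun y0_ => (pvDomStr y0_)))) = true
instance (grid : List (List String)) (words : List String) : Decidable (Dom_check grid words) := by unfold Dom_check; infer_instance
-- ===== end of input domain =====

-- B replaces A's materialised row/column line lists and set-size comparison with a single
-- early-exit pass over the cells that checks each cell's row and column prefix directly.

-- ===== PORT A =====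
def check (grid : List (List String)) (words : List String) : Bool × Option String :=
  let n := grid.length
  let m := (grid.getD 0 []).length
  let rlines := (List.range n).map (fun y => (List.range m).map (fun x => (grid.getD y []).getD x ""))
  let clines := (List.range m).map (fun x => (List.range n).map (fun y => (grid.getD y []).getD x ""))
  let lines := rlines ++ clines
  if lines.any (fun line => decide ((PySem.Set.ofList line).length ≠ line.length)) then
    (false, some "All letters in each row and column must be distinct.")
  else
    (true, none)

-- ===== PORT B =====
-- the double for-loop with early return, as recursion over the list of cell coordinates
def checkAltGo (grid : List (List String)) : List (Nat × Nat) → Bool × Option String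
  | [] => (true, none)
  | (y, x) :: rest =>
    let c := (grid.getD y []).getD x ""
    cond ((List.range x).any (fun i => (grid.getD y []).getD i "" == c)
        || (List.range y).any (fun j => (grid.getD j []).getD x "" == c))
      (false, some "All letters in each row and column must be distinct.")
      (checkAltGo grid rest)

def check_alt (grid : List (List String)) (words : List String) : Bool × Option String :=
  let n := grid.length
  let m := (grid.getD 0 []).length
  checkAltGo grid ((List.range n).flatMap (fun y => (List.range m).map (fun x => (y, x))))

-- ===== PRECONDITION & SPEC =====
-- Pre_ excludes exactly the inputs where Python A raises IndexError: the empty grid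
-- (len(grid[0])) and ragged grids with a row shorter than row 0 (grid[y][x]).
def Pre_check (grid : List (List String)) (words : List String) : Prop :=
  grid ≠ [] ∧ ∀ row ∈ grid, (grid.getD 0 []).length ≤ row.length
instance (grid : List (List String)) (words : List String) : Decidable (Pre_check grid words) := by
  unfold Pre_check; infer_instance

def pvWitness_check : List (List String) × List String := ([["a", "b"], ["b", "a"]], ["ab"])

def Spec_check (grid : List (List String)) (words : List String) (out : Bool × Option String) : Prop := out = check_alt grid words
instance (grid : List (List String)) (words : List String) (out : Bool × Option String) : Decidable (Spec_check grid words out) := by unfold Spec_check; infer_instance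

-- ===== CLAIM (what is proved, stated in full; the proofs are below) =====
def Claim_equal_check : Prop := ∀ (grid : List (List String)) (words : List String), Dom_check grid words → Pre_check grid words → Spec_check grid words (check grid words)

-- ===== LEMMAS AND PROOFS =====

-- PySem.Set.ofList is a sublist of its argument
lemma foldl_add_sublist {α : Type} [BEq α] (xs : List α) :
    ∀ s : List α, ∃ t, t.Sublist xs ∧ xs.foldl PySem.Set.add s = s ++ t := by
  induction xs with
  | nil => intro s; exact ⟨[], List.Sublist.refl _, by simp⟩
  | cons x xs ih =>
    intro s
    simp only [List.foldl_cons]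
    by_cases h : PySem.Set.contains s x = true
    · have h1 : PySem.Set.add s x = s := by unfold PySem.Set.add; rw [if_pos h]
      rcases ih s with ⟨t, hsub, heq⟩
      exact ⟨t, hsub.cons x, by rw [h1, heq]⟩
    · have h2 : PySem.Set.add s x = s ++ [x] := by unfold PySem.Set.add; rw [if_neg h]
      rcases ih (s ++ [x]) with ⟨t, hsub, heq⟩
      exact ⟨x :: t, hsub.cons₂ x, by rw [h2, heq]; simp⟩

lemma ofList_length_eq_iff_nodup {α : Type} [BEq α] [LawfulBEq α] (xs : List α) :
    (PySem.Set.ofList xs).length = xs.length ↔ xs.Nodup := by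
  constructor
  · intro h
    rcases foldl_add_sublist xs ([] : List α) with ⟨t, hsub, heq⟩
    have hof : PySem.Set.ofList xs = t := by
      rw [PySem.Set.ofList_eq_foldl, heq]; simp
    have : t = xs := hsub.eq_of_length (by rw [← hof, h])
    rw [← this, ← hof]
    exact PySem.Set.nodup_ofList xs
  · intro h
    rw [PySem.Set.ofList_eq_self_of_nodup _ h]

-- duplicates in a (range k).map f line, characterised by an earlier equal index
lemma notNodup_map_range (f : Nat → String) :
    ∀ k, ¬ ((List.range k).map f).Nodup ↔ ∃ x < k, ∃ i < x, f i = f x := by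
  intro k
  induction k with
  | zero => simp
  | succ k ih =>
    rw [List.range_succ, List.map_append, List.map_cons, List.map_nil,
      ← List.concat_eq_append, List.nodup_concat]
    constructor
    · intro h
      rcases not_and_or.mp h with h1 | h2
      · rw [not_not, List.mem_map] at h1
        rcases h1 with ⟨i, hi, he⟩
        rw [List.mem_range] at hi
        exact ⟨k, Nat.lt_succ_self k, i, hi, he⟩
      · rcases ih.mp h2 with ⟨x, hx, i, hi, he⟩
        exact ⟨x, Nat.lt_succ_of_lt hx, i, hi, he⟩
    · rintro ⟨x, hx, i, hi, he⟩ h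
      rcases Nat.lt_succ_iff_lt_or_eq.mp hx with hx' | rfl
      · exact ih.mpr ⟨x, hx', i, hi, he⟩ h.2
      · exact h.1 (List.mem_map.mpr ⟨i, List.mem_range.mpr hi, he⟩)

-- B's loop is 'any cell bad'
lemma checkAltGo_eq (grid : List (List String)) (l : List (Nat × Nat)) :
    checkAltGo grid l =
      if l.any (fun p => (List.range p.2).any (fun i => (grid.getD p.1 []).getD i "" == (grid.getD p.1 []).getD p.2 "")
          || (List.range p.1).any (fun j => (grid.getD j []).getD p.2 "" == (grid.getD p.1 []).getD p.2 "")) then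
        (false, some "All letters in each row and column must be distinct.")
      else (true, none) := by
  induction l with
  | nil => simp [checkAltGo]
  | cons p rest ih =>
    obtain ⟨y, x⟩ := p
    simp only [checkAltGo, List.any_cons]
    by_cases h : ((List.range x).any (fun i => (grid.getD y []).getD i "" == (grid.getD y []).getD x "")
        || (List.range y).any (fun j => (grid.getD j []).getD x "" == (grid.getD y []).getD x "")) = true
    · simp only [h, cond_true, Bool.true_or, reduceIte]
    · rw [Bool.not_eq_true] at h
      simp only [h, cond_false, Bool.false_or, ih]

lemma lines_any_eq_cells_any (grid : List (List String)) (n m : Nat) :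
    (((List.range n).map (fun y => (List.range m).map (fun x => (grid.getD y []).getD x "")) ++
      (List.range m).map (fun x => (List.range n).map (fun y => (grid.getD y []).getD x ""))).any
        (fun line => decide ((PySem.Set.ofList line).length ≠ line.length)))
    = (((List.range n).flatMap (fun y => (List.range m).map (fun x => (y, x)))).any
        (fun p => (List.range p.2).any (fun i => (grid.getD p.1 []).getD i "" == (grid.getD p.1 []).getD p.2 "")
          || (List.range p.1).any (fun j => (grid.getD j []).getD p.2 "" == (grid.getD p.1 []).getD p.2 ""))) := by
  rw [Bool.eq_iff_iff]
  simp only [List.any_eq_true, List.mem_append, List.mem_map, List.mem_range,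
    List.mem_flatMap, Bool.or_eq_true, decide_eq_true_eq, beq_iff_eq]
  constructor
  · rintro ⟨line, hmem, hne⟩
    have hnd : ¬ line.Nodup := fun h => hne ((ofList_length_eq_iff_nodup line).mpr h)
    rcases hmem with ⟨y, hy, rfl⟩ | ⟨x, hx, rfl⟩
    · rcases (notNodup_map_range (fun x => (grid.getD y []).getD x "") m).mp hnd with ⟨x, hxm, i, hix, he⟩
      exact ⟨(y, x), ⟨y, hy, x, hxm, rfl⟩, Or.inl ⟨i, hix, he⟩⟩
    · rcases (notNodup_map_range (fun y => (grid.getD y []).getD x "") n).mp hnd with ⟨y, hyn, j, hjy, he⟩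
      exact ⟨(y, x), ⟨y, hyn, x, hx, rfl⟩, Or.inr ⟨j, hjy, he⟩⟩
  · rintro ⟨⟨y, x⟩, ⟨y', hy, x', hx', heq⟩, hbad⟩
    injection heq with h1 h2
    subst h1; subst h2
    rcases hbad with ⟨i, hix, he⟩ | ⟨j, hjy, he⟩
    · refine ⟨(List.range m).map (fun x => (grid.getD y' []).getD x ""), Or.inl ⟨y', hy, rfl⟩, fun hlen => ?_⟩
      exact (notNodup_map_range (fun x => (grid.getD y' []).getD x "") m).mpr ⟨x', hx', i, hix, he⟩
        ((ofList_length_eq_iff_nodup _).mp hlen)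
    · refine ⟨(List.range n).map (fun y => (grid.getD y []).getD x' ""), Or.inr ⟨x', hx', rfl⟩, fun hlen => ?_⟩
      exact (notNodup_map_range (fun y => (grid.getD y []).getD x' "") n).mpr ⟨y', hy, j, hjy, he⟩
        ((ofList_length_eq_iff_nodup _).mp hlen)

theorem check_spec_aux (grid : List (List String)) (words : List String) :
    check grid words = check_alt grid words := by
  show (if _ then _ else _) = checkAltGo grid _
  rw [checkAltGo_eq, lines_any_eq_cells_any]

-- ===== VERDICT (by name: the statement is the Claim_ definition above) =====
theorem check_spec : Claim_equal_check := by
  intro grid words _ _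
  exact check_spec_aux grid words
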